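-- pv_equiv track=rewrite | github.com/chestnut24/DataKg | DataProcessing/RippleNet-PyTorch/src/kgDataCreate.py | handle_rel
-- ===== SOURCE A (Python) =====
-- def handle_rel(name1, name2):  # 用于返回两个节点之间的关系，如果无关返回FALSE
--     name1 = name1.split('_')
--     name2 = name2.split('_')
--     len1 = len(name1)
--     len2 = len(name2)
--     if abs(len1 - len2) == 1:  # 层级相差为1时才会有关系
--         flag = 0  # 用以判断是否相同，不同时变为1
--         if len1 - len2 < 0:  # len1比较小说明层级较小，就要判断第一个是不是包含第二个了
--             for index in range(len1):
--                 if name1[index] != name2[index]: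
--                     flag = 1
--                     break
--         else:
--             for index in range(len2):
--                 if name1[index] != name2[index]:
--                     flag = 1
--                     break
--         if flag == 0:
--             if len1 - len2 > 0:
--                 return 'belongsTo'
--             else:
--                 return 'contains'
--     return 'FALSE'
-- ===== SOURCE B (Python) =====
-- def handle_rel(name1, name2):
--     # A name is one level below another exactly when it extends it by '_' plus
--     # a single underscore-free segment; check that directly on the raw strings.
--     if name1.startswith(name2 + '_') and '_' not in name1[len(name2) + 1:]:
--         return 'belongsTo'
--     if name2.startswith(name1 + '_') and '_' not in name2[len(name1) + 1:]:
--         return 'contains'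
--     return 'FALSE'
-- ===== Notes on version B (the rewrite author's own statement) =====
-- stated objective: idiomatic
-- what changed: B never tokenises: instead of splitting both names on '_' and comparing token prefixes with an index loop and a flag, it checks on the raw strings that the longer name starts with the shorter one plus '_' and that the remaining suffix contains no '_'.
import Mathlib
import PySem

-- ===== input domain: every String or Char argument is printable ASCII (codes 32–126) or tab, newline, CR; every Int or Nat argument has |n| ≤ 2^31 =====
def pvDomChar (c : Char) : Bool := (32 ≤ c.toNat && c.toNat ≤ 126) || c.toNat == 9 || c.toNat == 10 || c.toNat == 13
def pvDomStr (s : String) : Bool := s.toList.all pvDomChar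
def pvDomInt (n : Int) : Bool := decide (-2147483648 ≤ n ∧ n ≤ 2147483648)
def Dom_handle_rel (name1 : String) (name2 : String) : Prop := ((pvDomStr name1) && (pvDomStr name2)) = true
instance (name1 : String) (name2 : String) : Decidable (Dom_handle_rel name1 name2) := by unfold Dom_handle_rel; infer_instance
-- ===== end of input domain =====

-- B replaces A's tokenise-then-compare-prefix loop by raw-string checks (startswith + underscore-free suffix); same O(n) cost, no token lists.

-- ===== PORT A =====
-- A's for-loop with `flag` and `break`: walk the index range, 1 on the first mismatch.
def flagLoopA (l1 l2 : List (List Char)) : List Int → Nat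
  | [] => 0
  | i :: rest =>
      if PySem.List.pyGet? l1 i ≠ PySem.List.pyGet? l2 i then 1 else flagLoopA l1 l2 rest

-- Port of A over code-point lists (PySem.Chars is the exact contents of the Str wrappers).
def handle_rel (name1 : String) (name2 : String) : String :=
  let l1 := PySem.Chars.splitOn name1.toList "_".toList
  let l2 := PySem.Chars.splitOn name2.toList "_".toList
  let len1 : Int := l1.length
  let len2 : Int := l2.length
  if (len1 - len2).natAbs = 1 then
    let flag : Nat :=
      if len1 - len2 < 0 then flagLoopA l1 l2 (PySem.List.pyRange 0 len1 1)
      else flagLoopA l1 l2 (PySem.List.pyRange 0 len2 1)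
    if flag = 0 then
      if len1 - len2 > 0 then "belongsTo" else "contains"
    else "FALSE"
  else "FALSE"

-- ===== PORT B =====
def handle_rel_alt (name1 : String) (name2 : String) : String :=
  let s1 := name1.toList
  let s2 := name2.toList
  if PySem.Chars.startswith s1 (s2 ++ ['_'])
      && !(PySem.Chars.isIn ['_'] (PySem.Chars.slice s1 (some ((s2.length : Int) + 1)) none)) then
    "belongsTo"
  else if PySem.Chars.startswith s2 (s1 ++ ['_'])
      && !(PySem.Chars.isIn ['_'] (PySem.Chars.slice s2 (some ((s1.length : Int) + 1)) none)) then
    "contains"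
  else
    "FALSE"

-- ===== PRECONDITION & SPEC =====
def Spec_handle_rel (name1 : String) (name2 : String) (out : String) : Prop := out = handle_rel_alt name1 name2
instance (name1 : String) (name2 : String) (out : String) : Decidable (Spec_handle_rel name1 name2 out) := by unfold Spec_handle_rel; infer_instance

-- ===== CLAIM (what is proved, stated in full; the proofs are below) =====
def Claim_equal_handle_rel : Prop := ∀ (name1 : String) (name2 : String), Dom_handle_rel name1 name2 → Spec_handle_rel name1 name2 (handle_rel name1 name2)

-- ===== LEMMAS AND PROOFS =====

-- proof-side model of Python's single-character split on '_'
def consHead (p : List Char) : List (List Char) → List (List Char)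
  | [] => [p]
  | t :: ts => (p ++ t) :: ts

def splitU : List Char → List (List Char)
  | [] => [[]]
  | c :: r => if c = '_' then [] :: splitU r else consHead [c] (splitU r)

def joinU : List (List Char) → List Char
  | [] => []
  | [t] => t
  | t :: ts => t ++ '_' :: joinU ts

theorem consHead_ne_nil (p : List Char) (l : List (List Char)) : consHead p l ≠ [] := by
  cases l <;> simp [consHead]

theorem splitU_ne_nil (s : List Char) : splitU s ≠ [] := by
  cases s with
  | nil => simp [splitU]
  | cons c r => by_cases h : c = '_' <;> simp [splitU, h, consHead_ne_nil]

theorem consHead_nil (l : List (List Char)) (h : l ≠ []) : consHead [] l = l := by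
  cases l with
  | nil => exact absurd rfl h
  | cons t ts => simp [consHead]

theorem consHead_consHead (p q : List Char) (l : List (List Char)) :
    consHead p (consHead q l) = consHead (p ++ q) l := by
  cases l <;> simp [consHead]

theorem go_eq (fuel : Nat) : ∀ (l cur : List Char) (acc : List (List Char)),
    l.length < fuel →
    PySem.Chars.splitOn.go ['_'] fuel l cur acc = acc.reverse ++ consHead cur.reverse (splitU l) := by
  induction fuel with
  | zero => intro l cur acc h; omega
  | succ f ih =>
    intro l cur acc h
    cases l with
    | nil => simp [PySem.Chars.splitOn.go, splitU, consHead]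
    | cons c rest =>
      by_cases hc : c = '_'
      · subst hc
        have hpre2 : List.isPrefixOf ['_'] ('_' :: rest) = true := by simp [List.isPrefixOf]
        simp only [PySem.Chars.splitOn.go, hpre2]
        rw [ih _ _ _ (by simpa using Nat.lt_of_succ_lt_succ h)]
        cases hsp : splitU rest with
        | nil => exact absurd hsp (splitU_ne_nil rest)
        | cons a b => simp [splitU, hsp, consHead]
      · have hpre : List.isPrefixOf ['_'] (c :: rest) = false := by
          simp [List.isPrefixOf]; exact fun h => absurd h.symm hc
        simp only [PySem.Chars.splitOn.go, hpre, Bool.false_eq_true, if_false]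
        rw [ih _ _ _ (by simpa using Nat.lt_of_succ_lt_succ h)]
        simp [splitU, hc, consHead_consHead]

theorem splitOn_eq_splitU (s : List Char) : PySem.Chars.splitOn s ['_'] = splitU s := by
  unfold PySem.Chars.splitOn
  rw [go_eq (s.length + 1) s [] [] (by omega)]
  simp [consHead_nil _ (splitU_ne_nil s)]

theorem splitU_no_sep (t : List Char) (h : '_' ∉ t) : splitU t = [t] := by
  induction t with
  | nil => rfl
  | cons c r ih =>
    have hc : c ≠ '_' := by intro hc; exact h (by simp [hc])
    rw [splitU, if_neg hc, ih (fun hm => h (by simp [hm]))]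
    simp [consHead]

theorem consHead_append_singleton (p : List Char) (l : List (List Char)) (t : List Char)
    (h : l ≠ []) : consHead p (l ++ [t]) = consHead p l ++ [t] := by
  cases l with
  | nil => exact absurd rfl h
  | cons x xs => simp [consHead]

theorem splitU_append_sep (s t : List Char) (h : '_' ∉ t) :
    splitU (s ++ '_' :: t) = splitU s ++ [t] := by
  induction s with
  | nil => simp [splitU, splitU_no_sep t h]
  | cons c r ih =>
    by_cases hc : c = '_'
    · subst hc; simp only [List.cons_append, splitU, ih]; rfl
    · simp only [List.cons_append, splitU, if_neg hc, ih,
        consHead_append_singleton _ _ _ (splitU_ne_nil r)]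

theorem joinU_cons_head (p h : List Char) (ts : List (List Char)) :
    joinU ((p ++ h) :: ts) = p ++ joinU (h :: ts) := by
  cases ts <;> simp [joinU]

theorem joinU_splitU (s : List Char) : joinU (splitU s) = s := by
  induction s with
  | nil => rfl
  | cons c r ih =>
    by_cases hc : c = '_'
    · subst hc
      rw [splitU, if_pos rfl]
      cases hsp : splitU r with
      | nil => exact absurd hsp (splitU_ne_nil r)
      | cons h ts =>
        have : joinU ([] :: h :: ts) = '_' :: joinU (h :: ts) := by simp [joinU]
        rw [this, ← hsp, ih]
    · rw [splitU, if_neg hc]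
      cases hsp : splitU r with
      | nil => exact absurd hsp (splitU_ne_nil r)
      | cons h ts =>
        have : consHead [c] (h :: ts) = ([c] ++ h) :: ts := by simp [consHead]
        rw [this, joinU_cons_head, ← hsp, ih]; rfl

theorem joinU_append_singleton (l : List (List Char)) (t : List Char) (h : l ≠ []) :
    joinU (l ++ [t]) = joinU l ++ '_' :: t := by
  induction l with
  | nil => exact absurd rfl h
  | cons x xs ih =>
    cases xs with
    | nil => simp [joinU]
    | cons y ys =>
      have : joinU ((x :: y :: ys) ++ [t]) = x ++ '_' :: joinU ((y :: ys) ++ [t]) := by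
        simp [joinU]
      rw [this, ih (by simp)]
      have h2 : joinU (x :: y :: ys) = x ++ '_' :: joinU (y :: ys) := by simp [joinU]
      rw [h2]
      simp

theorem sep_not_mem_splitU (s : List Char) : ∀ x ∈ splitU s, '_' ∉ x := by
  induction s with
  | nil => intro x hx; simp [splitU] at hx; simp [hx]
  | cons c r ih =>
    intro x hx
    by_cases hc : c = '_'
    · subst hc; rw [splitU, if_pos rfl] at hx
      rcases List.mem_cons.mp hx with h | h
      · simp [h]
      · exact ih x h
    · rw [splitU, if_neg hc] at hx
      cases hsp : splitU r with
      | nil => exact absurd hsp (splitU_ne_nil r)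
      | cons h ts =>
        rw [hsp] at hx
        simp [consHead] at hx
        rcases hx with h1 | h1
        · subst h1; intro hm
          rcases List.mem_cons.mp hm with h2 | h2
          · exact hc h2.symm
          · exact ih h (by rw [hsp]; exact List.mem_cons_self) h2
        · exact ih x (by rw [hsp]; exact List.mem_cons.mpr (Or.inr h1))

-- tokens-of-one-more-level ↔ raw-string shape
theorem splitU_succ_iff (s1 s2 : List Char) :
    (∃ t, splitU s1 = splitU s2 ++ [t]) ↔ ∃ t, '_' ∉ t ∧ s1 = s2 ++ '_' :: t := by
  constructor
  · rintro ⟨t, ht⟩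
    have hmem : t ∈ splitU s1 := by rw [ht]; simp
    have hno : '_' ∉ t := sep_not_mem_splitU s1 t hmem
    refine ⟨t, hno, ?_⟩
    have := joinU_splitU s1
    rw [ht, joinU_append_singleton _ _ (splitU_ne_nil s2), joinU_splitU s2] at this
    exact this.symm
  · rintro ⟨t, hno, hs⟩
    exact ⟨t, by rw [hs, splitU_append_sep s2 t hno]⟩

-- B's guard, as a proposition
theorem bguard_iff (s1 s2 : List Char) :
    (PySem.Chars.startswith s1 (s2 ++ ['_'])
      && !(PySem.Chars.isIn ['_'] (PySem.Chars.slice s1 (some ((s2.length : Int) + 1)) none))) = true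
    ↔ ∃ t, '_' ∉ t ∧ s1 = s2 ++ '_' :: t := by
  have hcast : ((s2.length : Int) + 1) = ((s2.length + 1 : Nat) : Int) := by push_cast; ring
  rw [Bool.and_eq_true, PySem.Chars.startswith_iff, Bool.not_eq_eq_eq_not, Bool.not_true,
    PySem.Chars.slice_eq_listSlice, hcast, PySem.List.slice_from_natCast,
    PySem.Chars.isIn_eq_false_iff]
  constructor
  · rintro ⟨⟨u, hu⟩, hni⟩
    refine ⟨s1.drop (s2.length + 1), ?_, ?_⟩
    · intro hm
      exact hni ((List.singleton_infix_iff _ _).mpr hm)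
    · have h1 : (s2 ++ ['_']) ++ u = s2 ++ '_' :: u := by simp
      have h2 : (s2 ++ ['_']).length = s2.length + 1 := by simp
      rw [← hu, ← h2, List.drop_left, h1]
  · rintro ⟨t, hno, hs⟩
    subst hs
    constructor
    · exact ⟨t, by simp⟩
    · have hdrop : (s2 ++ '_' :: t).drop (s2.length + 1) = t := by
        have h1 : s2 ++ '_' :: t = (s2 ++ ['_']) ++ t := by simp
        have h2 : (s2 ++ ['_']).length = s2.length + 1 := by simp
        rw [h1, ← h2, List.drop_left]
      rw [hdrop]
      intro hinf
      exact hno ((List.singleton_infix_iff _ _).mp hinf)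

-- A's flag loop is 0 iff every visited index agrees
theorem flagLoopA_eq_zero_iff (l1 l2 : List (List Char)) (r : List Int) :
    flagLoopA l1 l2 r = 0 ↔ ∀ i ∈ r, PySem.List.pyGet? l1 i = PySem.List.pyGet? l2 i := by
  induction r with
  | nil => simp [flagLoopA]
  | cons i rest ih =>
    by_cases h : PySem.List.pyGet? l1 i = PySem.List.pyGet? l2 i
    · simp [flagLoopA, h, ih]
    · simp [flagLoopA, h]

-- length + pointwise agreement on the shorter range ↔ append of one token
theorem append_singleton_iff (T1 T2 : List (List Char)) :
    (T1.length = T2.length + 1 ∧ ∀ j < T2.length, T1[j]? = T2[j]?) ↔ ∃ t, T1 = T2 ++ [t] := by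
  constructor
  · rintro ⟨hlen, hpt⟩
    have hlt : T2.length < T1.length := by omega
    refine ⟨T1[T2.length], ?_⟩
    apply List.ext_getElem?
    intro j
    by_cases hj : j < T2.length
    · rw [hpt j hj, List.getElem?_append_left hj]
    · by_cases hj2 : j = T2.length
      · subst hj2
        rw [List.getElem?_eq_getElem hlt]
        rw [List.getElem?_append_right (le_refl _)]
        simp
      · have h1 : T1.length ≤ j := by omega
        have h2 : (T2 ++ [T1[T2.length]]).length ≤ j := by simp; omega
        rw [List.getElem?_eq_none h1, List.getElem?_eq_none h2]
  · rintro ⟨t, ht⟩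
    subst ht
    exact ⟨by simp, fun j hj => by rw [List.getElem?_append_left hj]⟩

theorem range_agree_iff (T1 T2 : List (List Char)) (n : Nat) :
    (∀ i ∈ PySem.List.pyRange 0 (n : Int) 1, PySem.List.pyGet? T1 i = PySem.List.pyGet? T2 i)
    ↔ ∀ j < n, T1[j]? = T2[j]? := by
  constructor
  · intro h j hj
    have := h (j : Int) (by rw [PySem.List.mem_pyRange_one]; constructor <;> [positivity; exact_mod_cast hj])
    simpa [PySem.List.pyGet?_natCast] using this
  · intro h i hi
    rw [PySem.List.mem_pyRange_one] at hi
    obtain ⟨h0, hn⟩ := hi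
    have : i = ((i.toNat : Nat) : Int) := by omega
    rw [this, PySem.List.pyGet?_natCast, PySem.List.pyGet?_natCast]
    exact h i.toNat (by omega)

-- A's full positive condition for "s1 one level below s2"
theorem acond_iff (s1 s2 : List Char) :
    ((splitU s1).length = (splitU s2).length + 1 ∧
      flagLoopA (splitU s1) (splitU s2) (PySem.List.pyRange 0 ((splitU s2).length : Int) 1) = 0)
    ↔ ∃ t, '_' ∉ t ∧ s1 = s2 ++ '_' :: t := by
  rw [flagLoopA_eq_zero_iff, range_agree_iff, append_singleton_iff, splitU_succ_iff]

-- ===== VERDICT (by name: the statement is the Claim_ definition above) =====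
theorem handle_rel_spec : Claim_equal_handle_rel := by
  intro name1 name2 _
  unfold Spec_handle_rel handle_rel handle_rel_alt
  have hsep : "_".toList = ['_'] := rfl
  simp only [hsep, splitOn_eq_splitU]
  set s1 := name1.toList
  set s2 := name2.toList
  by_cases hb1 : ∃ t, '_' ∉ t ∧ s1 = s2 ++ '_' :: t
  · -- both sides answer belongsTo
    have hB := (bguard_iff s1 s2).mpr hb1
    obtain ⟨hlen, hflag⟩ := (acond_iff s1 s2).mpr hb1
    have habs : (((splitU s1).length : Int) - ((splitU s2).length : Int)).natAbs = 1 := by omega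
    have hlt : ¬ (((splitU s1).length : Int) - ((splitU s2).length : Int) < 0) := by omega
    have hgt : ((splitU s1).length : Int) - ((splitU s2).length : Int) > 0 := by omega
    rw [if_pos hB, if_pos habs, if_neg hlt, if_pos hflag, if_pos hgt]
  · by_cases hb2 : ∃ t, '_' ∉ t ∧ s2 = s1 ++ '_' :: t
    · -- both sides answer contains
      have hB1 : ¬ ((PySem.Chars.startswith s1 (s2 ++ ['_'])
          && !(PySem.Chars.isIn ['_'] (PySem.Chars.slice s1 (some ((s2.length : Int) + 1)) none))) = true) :=
        fun h => hb1 ((bguard_iff s1 s2).mp h)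
      have hB2 := (bguard_iff s2 s1).mpr hb2
      obtain ⟨hlen, hflag0⟩ := (acond_iff s2 s1).mpr hb2
      have hflag : flagLoopA (splitU s1) (splitU s2)
          (PySem.List.pyRange 0 ((splitU s1).length : Int) 1) = 0 := by
        rw [flagLoopA_eq_zero_iff] at hflag0 ⊢
        intro i hi
        exact (hflag0 i hi).symm
      have habs : (((splitU s1).length : Int) - ((splitU s2).length : Int)).natAbs = 1 := by omega
      have hlt : ((splitU s1).length : Int) - ((splitU s2).length : Int) < 0 := by omega
      have hngt : ¬ (((splitU s1).length : Int) - ((splitU s2).length : Int) > 0) := by omega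
      rw [if_neg hB1, if_pos hB2, if_pos habs, if_pos hlt, if_pos hflag, if_neg hngt]
    · -- both sides answer FALSE
      have hB1 : ¬ ((PySem.Chars.startswith s1 (s2 ++ ['_'])
          && !(PySem.Chars.isIn ['_'] (PySem.Chars.slice s1 (some ((s2.length : Int) + 1)) none))) = true) :=
        fun h => hb1 ((bguard_iff s1 s2).mp h)
      have hB2 : ¬ ((PySem.Chars.startswith s2 (s1 ++ ['_'])
          && !(PySem.Chars.isIn ['_'] (PySem.Chars.slice s2 (some ((s1.length : Int) + 1)) none))) = true) :=
        fun h => hb2 ((bguard_iff s2 s1).mp h)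
      rw [if_neg hB1, if_neg hB2]
      by_cases habs : (((splitU s1).length : Int) - ((splitU s2).length : Int)).natAbs = 1
      · rw [if_pos habs]
        by_cases hlt : ((splitU s1).length : Int) - ((splitU s2).length : Int) < 0
        · have hlen : (splitU s2).length = (splitU s1).length + 1 := by omega
          have hne : flagLoopA (splitU s1) (splitU s2)
              (PySem.List.pyRange 0 ((splitU s1).length : Int) 1) ≠ 0 := by
            intro h0
            apply hb2
            apply (acond_iff s2 s1).mp
            refine ⟨hlen, ?_⟩
            rw [flagLoopA_eq_zero_iff] at h0 ⊢
            intro i hi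
            exact (h0 i hi).symm
          rw [if_pos hlt, if_neg hne]
        · have hlen : (splitU s1).length = (splitU s2).length + 1 := by omega
          have hne : flagLoopA (splitU s1) (splitU s2)
              (PySem.List.pyRange 0 ((splitU s2).length : Int) 1) ≠ 0 :=
            fun h0 => hb1 ((acond_iff s1 s2).mp ⟨hlen, h0⟩)
          rw [if_neg hlt, if_neg hne]
      · rw [if_neg habs]
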